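-- pv_equiv track=rewrite | github.com/jshimbo/adventofcode | 2024/d04.py | makeMask
-- ===== SOURCE A (Python) =====
-- def makeMask(s):
--     # make matrix with string in diagonal
--     width = len(s)  # matrix is square
--
--     target = list(s)
--     mask = []
--
--     for y in range(width):
--         mask.append([])
--         for x in range(width):
--             if x == y:
--                 mask[y].append(target[x])
--             else:
--                 mask[y].append(" ")
--
--     return mask
-- ===== SOURCE B (Python) =====
-- def makeMask(s):
--     # make matrix with string in diagonal, via a flat n*n buffer:
--     # one strided slice assignment writes the whole diagonal, then chunk into rows
--     n = len(s)
--     flat = [" "] * (n * n)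
--     flat[::n + 1] = list(s)
--     return [flat[y * n:(y + 1) * n] for y in range(n)]
-- ===== Notes on version B (the rewrite author's own statement) =====
-- stated objective: alternative
-- what changed: A grows the matrix cell by cell with nested index loops and an x==y branch; B uses a different data structure: a single flat n*n blank buffer whose diagonal is written in one strided slice assignment flat[::n+1]=list(s), then sliced into rows, so no per-cell comparison ever happens.
import Mathlib
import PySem

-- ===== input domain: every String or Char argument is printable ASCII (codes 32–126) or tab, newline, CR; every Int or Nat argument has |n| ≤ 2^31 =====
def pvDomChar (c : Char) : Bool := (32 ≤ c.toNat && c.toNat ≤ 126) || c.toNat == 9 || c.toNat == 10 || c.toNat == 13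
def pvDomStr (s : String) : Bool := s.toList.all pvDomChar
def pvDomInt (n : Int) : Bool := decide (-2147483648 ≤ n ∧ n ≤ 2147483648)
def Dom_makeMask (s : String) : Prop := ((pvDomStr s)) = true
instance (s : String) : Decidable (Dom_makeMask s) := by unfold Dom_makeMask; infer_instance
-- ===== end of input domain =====

-- B drops A's nested per-cell loops with the x==y branch: it writes the diagonal of a flat
-- n*n blank buffer with one strided slice assignment and then slices the buffer into rows.

-- ===== PORT A =====
-- A: nested loops; for each y a row is grown cell by cell, branching on x == y.
def makeMask (s : String) : List (List String) :=
  let width := s.toList.length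
  let target := s.toList.map (fun c => String.ofList [c])
  (List.range width).foldl
    (fun mask y =>
      mask ++ [(List.range width).foldl
        (fun row x => row ++ [if x = y then target[x]! else " "]) []])
    []

-- ===== PORT B =====
-- B: flat n*n buffer; `flat[::n+1] = list(s)` is ported by hand (exact here: the strided
-- slice has exactly n positions i*(n+1), i = 0..n-1, and the assigned list has length n,
-- so the assignment writes s[i] at index i*(n+1)); rows are contiguous slices.
def makeMask_alt (s : String) : List (List String) :=
  let n := s.toList.length
  let flat0 := List.replicate (n * n) " "
  let flat := (List.range n).foldl
    (fun f i => f.set (i * (n + 1)) (String.ofList [s.toList[i]!])) flat0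
  (List.range n).map (fun y =>
    PySem.List.slice flat (some ((y * n : Nat) : Int)) (some (((y + 1) * n : Nat) : Int)))

-- ===== PRECONDITION & SPEC =====
def Spec_makeMask (s : String) (out : List (List String)) : Prop := out = makeMask_alt s
instance (s : String) (out : List (List String)) : Decidable (Spec_makeMask s out) := by unfold Spec_makeMask; infer_instance

-- ===== CLAIM (what is proved, stated in full; the proofs are below) =====
def Claim_equal_makeMask : Prop := ∀ (s : String), Dom_makeMask s → Spec_makeMask s (makeMask s)

-- ===== LEMMAS AND PROOFS =====

-- A's inner row loop produces exactly a map over the range.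
theorem rowA_eq_map (n y : Nat) (t : List String) :
    (List.range n).foldl (fun row x => row ++ [if x = y then t[x]! else " "]) []
      = (List.range n).map (fun x => if x = y then t[x]! else " ") := by
  simpa using PySem.List.foldl_append_singleton_eq_map (fun x => if x = y then t[x]! else " ") (List.range n) []

-- The diagonal-writing fold, abstracted for the lemmas.
def diagFold (n : Nat) (t : List String) (m : Nat) : List String :=
  (List.range m).foldl (fun f i => f.set (i * (n + 1)) t[i]!) (List.replicate (n * n) " ")

theorem diagFold_succ (n : Nat) (t : List String) (m : Nat) :
    diagFold n t (m + 1) = (diagFold n t m).set (m * (n + 1)) t[m]! := by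
  simp [diagFold, List.range_succ]

theorem diagFold_length (n : Nat) (t : List String) (m : Nat) :
    (diagFold n t m).length = n * n := by
  induction m with
  | zero => simp [diagFold]
  | succ m ih => rw [diagFold_succ]; simpa using ih

-- Off-diagonal positions stay blank.
theorem diagFold_blank (n : Nat) (t : List String) (m j : Nat) (hj : j < n * n)
    (h : ∀ i, i < m → j ≠ i * (n + 1)) : (diagFold n t m)[j]! = " " := by
  induction m with
  | zero =>
    simp only [diagFold, List.range_zero, List.foldl_nil]
    rw [getElem!_pos (List.replicate (n * n) " ") j (by simpa using hj)]
    simp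
  | succ m ih =>
    rw [diagFold_succ]
    have hlen : j < ((diagFold n t m).set (m * (n + 1)) t[m]!).length := by
      simpa [diagFold_length] using hj
    rw [getElem!_pos ((diagFold n t m).set (m * (n + 1)) t[m]!) j hlen, List.getElem_set]
    have hne : m * (n + 1) ≠ j := fun hh => h m (Nat.lt_succ_self m) hh.symm
    rw [if_neg hne]
    have := ih (fun i hi => h i (Nat.lt_succ_of_lt hi))
    rwa [getElem!_pos (diagFold n t m) j (by simpa [diagFold_length] using hj)] at this

-- Diagonal positions carry the written value.
theorem diagFold_diag (n : Nat) (t : List String) (m i : Nat) (hi : i < m)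
    (hlt : i * (n + 1) < n * n) : (diagFold n t m)[i * (n + 1)]! = t[i]! := by
  induction m with
  | zero => omega
  | succ m ih =>
    rw [diagFold_succ]
    have hlen : i * (n + 1) < ((diagFold n t m).set (m * (n + 1)) t[m]!).length := by
      simpa [diagFold_length] using hlt
    rw [getElem!_pos ((diagFold n t m).set (m * (n + 1)) t[m]!) (i * (n + 1)) hlen, List.getElem_set]
    by_cases him : i = m
    · subst him; simp
    · have hne : m * (n + 1) ≠ i * (n + 1) := by
        intro hh
        exact him (Nat.eq_of_mul_eq_mul_right (Nat.succ_pos n) hh).symm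
      rw [if_neg hne]
      have := ih (by omega)
      rwa [getElem!_pos (diagFold n t m) (i * (n + 1)) (by simpa [diagFold_length] using hlt)] at this

-- There is at most one way to hit the stride: y*n + x = i*(n+1) with x,y,i < n forces x = y = i.
theorem stride_unique (n x y i : Nat) (hx : x < n) (hy : y < n) (hi : i < n)
    (h : y * n + x = i * (n + 1)) : x = i ∧ y = i := by
  have hni : i * (n + 1) = i * n + i := by ring
  rcases Nat.lt_trichotomy y i with hlt | rfl | hgt
  · have h1 : (y + 1) * n ≤ i * n := Nat.mul_le_mul_right n hlt
    have h2 : (y + 1) * n = y * n + n := by ring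
    linarith
  · constructor
    · have : y * n + x = y * n + y := by linarith
      omega
    · rfl
  · have h1 : (i + 1) * n ≤ y * n := Nat.mul_le_mul_right n hgt
    have h2 : (i + 1) * n = i * n + n := by ring
    linarith

-- Each row slice of the final buffer is A's row.
theorem row_slice (n y : Nat) (t : List String) (hy : y < n) :
    PySem.List.slice (diagFold n t n) (some ((y * n : Nat) : Int)) (some (((y + 1) * n : Nat) : Int))
      = (List.range n).map (fun x => if x = y then t[x]! else " ") := by
  rw [PySem.List.slice_natCast]
  have hsub : (y + 1) * n - y * n = n := by
    have : (y + 1) * n = y * n + n := by ring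
    omega
  rw [hsub]
  have hflat : (diagFold n t n).length = n * n := diagFold_length n t n
  have hdrop : n ≤ (diagFold n t n).length - y * n := by
    have h1 : (y + 1) * n ≤ n * n := Nat.mul_le_mul_right n hy
    have h2 : (y + 1) * n = y * n + n := by ring
    omega
  apply List.ext_getElem
  · simp [hflat]
    have h1 : (y + 1) * n ≤ n * n := Nat.mul_le_mul_right n hy
    have h2 : (y + 1) * n = y * n + n := by ring
    omega
  · intro x hx1 hx2
    have hxn : x < n := by simpa using hx2
    have hidx : y * n + x < n * n := by
      have h1 : (y + 1) * n ≤ n * n := Nat.mul_le_mul_right n hy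
      have h2 : (y + 1) * n = y * n + n := by ring
      omega
    rw [List.getElem_take, List.getElem_drop]
    simp only [List.getElem_map, List.getElem_range]
    have hget : (diagFold n t n)[y * n + x] = (diagFold n t n)[y * n + x]! := by
      rw [getElem!_pos (diagFold n t n) (y * n + x) (by omega)]
    rw [hget]
    by_cases hxy : x = y
    · subst hxy
      have he : x * n + x = x * (n + 1) := by ring
      rw [if_pos rfl, he]
      exact diagFold_diag n t n x hxn (he ▸ hidx)
    · rw [if_neg hxy]
      apply diagFold_blank n t n _ hidx
      intro i hi hh
      obtain ⟨h1, h2⟩ := stride_unique n x y i hxn hy hi hh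
      omega

theorem makeMask_spec : Claim_equal_makeMask := by
  intro s _
  unfold Spec_makeMask makeMask makeMask_alt
  simp only []
  rw [show ((List.range s.toList.length).foldl
      (fun mask y =>
        mask ++ [(List.range s.toList.length).foldl
          (fun row x => row ++ [if x = y then (s.toList.map (fun c => String.ofList [c]))[x]! else " "]) []])
      []) = _ from
    PySem.List.foldl_append_singleton_eq_map _ (List.range s.toList.length) []]
  simp only [List.nil_append]
  apply List.map_congr_left
  intro y hy
  rw [rowA_eq_map]
  have hfold : (List.range s.toList.length).foldl
      (fun f i => f.set (i * (s.toList.length + 1)) (String.ofList [s.toList[i]!]))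
      (List.replicate (s.toList.length * s.toList.length) " ")
      = diagFold s.toList.length (s.toList.map (fun c => String.ofList [c])) s.toList.length := by
    unfold diagFold
    apply PySem.List.foldl_congr_mem
    intro f i hi
    have hilt := List.mem_range.mp hi
    rw [getElem!_pos (s.toList.map (fun c => String.ofList [c])) i (by simpa using hilt),
        getElem!_pos s.toList i hilt]
    simp
  rw [hfold]
  exact (row_slice s.toList.length y (s.toList.map (fun c => String.ofList [c])) (List.mem_range.mp hy)).symm
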